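-- pv_equiv track=rewrite | github.com/ValeryKharkov/Dradf_notebook | kontur/sandbox/B.py | del_elements
-- ===== SOURCE A (Python) =====
-- def del_elements(arg_list: list) -> list:
--     i = 0
--     while i < len(arg_list):
--         try:
--             i_opposite_num = arg_list.index(-arg_list[i], i + 1)  # определение индекса противоположного элемента (начиная со следующего)
--             del arg_list[i_opposite_num]  # удаление противоположного числа
--             del arg_list[i]  # удаление текущего элемента
--         except ValueError:  # если нет противоположного элемента
--             i += 1  # переходим к следующему элементу
--     return arg_list
-- ===== SOURCE B (Python) =====
-- def del_elements(arg_list: list) -> list: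
--     # Two-pass counting rewrite: same return value; like A, mutates arg_list in place.
--     cnt = {}
--     for x in arg_list:
--         cnt[x] = cnt.get(x, 0) + 1
--     drop = {}
--     for x in arg_list:
--         c = cnt[x]
--         drop[x] = c - c % 2 if x == 0 else min(c, cnt.get(-x, 0))
--     out = []
--     for x in arg_list:
--         if drop[x] > 0:
--             drop[x] -= 1
--         else:
--             out.append(x)
--     arg_list[:] = out
--     return arg_list
-- ===== Notes on version B (the rewrite author's own statement) =====
-- stated objective: faster
-- what changed: A repeatedly rescans the remaining list with list.index and deletes matched opposite pairs in place (quadratic); B computes per-value counts once and keeps, in one filtering pass, the last |count(v)-count(-v)| occurrences of the majority sign (last zero kept iff the zero count is odd).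
import Mathlib
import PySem

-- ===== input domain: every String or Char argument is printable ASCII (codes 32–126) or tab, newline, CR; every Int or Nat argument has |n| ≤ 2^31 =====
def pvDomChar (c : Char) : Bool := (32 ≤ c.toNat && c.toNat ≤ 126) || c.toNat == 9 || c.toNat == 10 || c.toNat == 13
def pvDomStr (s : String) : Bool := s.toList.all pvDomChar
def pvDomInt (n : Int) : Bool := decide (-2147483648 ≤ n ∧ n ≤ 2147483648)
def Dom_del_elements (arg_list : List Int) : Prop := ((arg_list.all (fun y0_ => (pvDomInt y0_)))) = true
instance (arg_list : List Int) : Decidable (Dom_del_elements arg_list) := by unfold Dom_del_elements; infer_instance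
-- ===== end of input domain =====

-- B replaces A's quadratic delete-opposite-pairs while-loop by two counting passes
-- (per-value net counts, then a single filtering pass); equivalence of RETURN values is
-- proved (both Pythons also mutate arg_list in place to that same value).

-- ===== PORT A =====
-- A's while-loop: i is the Python loop index; `arg_list.index(-arg_list[i], i + 1)` is
-- ported exactly as a search in the dropped prefix, `PySem.List.index? (l.drop (i+1)) v`
-- shifted by i+1 (Python's list.index with a start argument); `del` at an in-range index
-- is List.eraseIdx.  The loop is driven by an explicit fuel bound (2·len+1 dominates the
-- loop measure 2·len − i, which strictly decreases every iteration), so it performs the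
-- same computation as the Python loop on every input.
def delLoop : Nat → List Int → Nat → List Int
  | 0, l, _ => l
  | fuel + 1, l, i =>
    if h : i < l.length then
      match PySem.List.index? (l.drop (i + 1)) (-(l[i]'h)) with
      | some j => delLoop fuel ((l.eraseIdx (i + 1 + j)).eraseIdx i) i
      | none => delLoop fuel l (i + 1)
    else l

def del_elements (arg_list : List Int) : List Int :=
  delLoop (2 * arg_list.length + 1) arg_list 0

-- ===== PORT B =====
-- Source B line by line: `cnt` is the counter dict, `drop` the per-value number of
-- occurrences to delete, the last loop filters with `drop` as a decrementing budget.
-- `cnt[x]` is ported as getD (exact: x was just counted, so it is a key of cnt).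
def del_elements_alt (arg_list : List Int) : List Int :=
  let cnt : PySem.Dict Int Int :=
    arg_list.foldl (fun d x => d.insert x (d.getD x 0 + 1)) PySem.Dict.empty
  let drop : PySem.Dict Int Int :=
    arg_list.foldl (fun d x =>
      let c := cnt.getD x 0
      d.insert x (if x = 0 then c - PySem.Int.mod c 2 else min c (cnt.getD (-x) 0)))
      PySem.Dict.empty
  let res :=
    arg_list.foldl (fun (p : List Int × PySem.Dict Int Int) x =>
      if p.2.getD x 0 > 0 then (p.1, p.2.insert x (p.2.getD x 0 - 1))
      else (p.1 ++ [x], p.2)) ([], drop)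
  res.1

-- ===== PRECONDITION & SPEC =====
def Spec_del_elements (arg_list : List Int) (out : List Int) : Prop := out = del_elements_alt arg_list
instance (arg_list : List Int) (out : List Int) : Decidable (Spec_del_elements arg_list out) := by unfold Spec_del_elements; infer_instance

-- ===== CLAIM (what is proved, stated in full; the proofs are below) =====
def Claim_equal_del_elements : Prop := ∀ (arg_list : List Int), Dom_del_elements arg_list → Spec_del_elements arg_list (del_elements arg_list)

-- ===== LEMMAS AND PROOFS =====

-- Functional reading of A's loop at position 0: drop the head together with the first
-- later opposite when there is one, otherwise keep the head.
def pvF : List Int → List Int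
  | [] => []
  | h :: t => if -h ∈ t then pvF (t.erase (-h)) else h :: pvF t
termination_by l => l.length
decreasing_by
  · have h1 : (t.erase (-h)).length ≤ t.length := List.length_erase_le
    simp only [List.length_cons]; omega
  · simp

-- Filtering with a per-value budget of occurrences to drop.
def pvG (d : Int → Nat) : List Int → List Int
  | [] => []
  | x :: t => if d x = 0 then x :: pvG d t else pvG (Function.update d x (d x - 1)) t

-- The budget A's loop realises: all of the minority sign plus its match (zeros pair among
-- themselves, leaving one when the count is odd).
def pvDrops (l : List Int) (x : Int) : Nat :=
  if x = 0 then l.count 0 - l.count 0 % 2 else min (l.count x) (l.count (-x))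

theorem pvG_congr (t : List Int) (d1 d2 : Int → Nat) (h : ∀ x ∈ t, d1 x = d2 x) :
    pvG d1 t = pvG d2 t := by
  induction t generalizing d1 d2 with
  | nil => rfl
  | cons x t ih =>
    have hx : d1 x = d2 x := h x (by simp)
    simp only [pvG, hx]
    split
    · exact congrArg _ (ih d1 d2 fun y hy => h y (by simp [hy]))
    · exact ih _ _ fun y hy => by
        by_cases hyx : y = x <;> simp [Function.update, hyx, h y (List.mem_cons_of_mem _ hy)]

theorem pvG_erase (t : List Int) (d : Int → Nat) (y : Int) (hy : y ∈ t) (hd : d y ≠ 0) :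
    pvG d t = pvG (Function.update d y (d y - 1)) (t.erase y) := by
  induction t generalizing d with
  | nil => cases hy
  | cons z t ih =>
    by_cases hzy : z = y
    · subst hzy
      rw [List.erase_cons_head]
      simp [pvG, hd]
    · rw [List.erase_cons_tail (by simp [hzy])]
      have hyt : y ∈ t := (List.mem_cons.1 hy).resolve_left (fun h => hzy h.symm)
      have hyz : y ≠ z := fun h => hzy h.symm
      have hup : Function.update d y (d y - 1) z = d z := Function.update_of_ne hzy _ _
      by_cases hz : d z = 0
      · simp only [pvG, hup, if_pos hz]
        exact congrArg _ (ih _ hyt hd)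
      · simp only [pvG, hup, if_neg hz]
        have hdy : Function.update d z (d z - 1) y = d y := Function.update_of_ne hyz _ _
        rw [ih (Function.update d z (d z - 1)) hyt (by rw [hdy]; exact hd)]
        apply pvG_congr
        intro w _
        rw [hdy]
        by_cases hwz : w = z <;> by_cases hwy : w = y <;>
          simp [Function.update, hwz, hwy, hzy, hyz]

theorem pvF_eq_pvG (l : List Int) : pvF l = pvG (pvDrops l) l := by
  induction l using pvF.induct with
  | case1 => simp [pvF, pvG]
  | case2 h t hmem ih =>
    -- -h ∈ t : the head and its first later opposite are both dropped
    have hcntm : 1 ≤ t.count (-h) := List.one_le_count_iff.2 hmem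
    rw [pvF, if_pos hmem, ih]
    by_cases h0 : h = 0
    · subst h0
      simp only [neg_zero] at hmem hcntm ⊢
      have hDv : pvDrops (0 :: t) 0 = (t.count 0 + 1) - (t.count 0 + 1) % 2 := by
        simp [pvDrops, List.count_cons_self]
      rw [pvG, if_neg (by rw [hDv]; omega)]
      rw [pvG_erase t _ 0 hmem (by simp [Function.update_self]; rw [hDv]; omega)]
      apply (pvG_congr _ _ _ _).symm
      intro y hy
      by_cases hy0 : y = 0
      · subst hy0
        have : pvDrops (t.erase 0) 0 = (t.count 0 - 1) - (t.count 0 - 1) % 2 := by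
          simp [pvDrops, List.count_erase_self]
        rw [this]
        simp [Function.update_self]
        rw [hDv]
        omega
      · have hny0 : (-y) ≠ (0:Int) := by simpa using hy0
        rw [Function.update_of_ne hy0, Function.update_of_ne hy0]
        simp [pvDrops, hy0, List.count_cons_of_ne (fun h => hy0 h.symm),
          List.count_cons_of_ne (fun h => hny0 h.symm),
          List.count_erase_of_ne hy0, List.count_erase_of_ne hny0]
    · -- h ≠ 0
      have hneh : -h ≠ h := by intro he; apply h0; omega
      have hh0 : (-h) ≠ (0:Int) := by simpa using h0
      have hDv : pvDrops (h :: t) h = min (t.count h + 1) (t.count (-h)) := by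
        simp [pvDrops, h0, List.count_cons_self, List.count_cons_of_ne hneh.symm]
      have hDnv : pvDrops (h :: t) (-h) = min (t.count (-h)) (t.count h + 1) := by
        simp [pvDrops, hh0, neg_neg, List.count_cons_of_ne hneh.symm, List.count_cons_self]
      rw [pvG, if_neg (by rw [hDv]; omega)]
      rw [pvG_erase t _ (-h) hmem (by
        rw [Function.update_of_ne hneh, hDnv]; omega)]
      apply (pvG_congr _ _ _ _).symm
      intro y hy
      by_cases hyh : y = h
      · subst hyh
        rw [Function.update_of_ne (fun h => hneh h.symm), Function.update_self]
        have : pvDrops (t.erase (-y)) y = min (t.count y) (t.count (-y) - 1) := by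
          simp [pvDrops, h0, List.count_erase_of_ne (fun h => hneh h.symm),
            List.count_erase_self]
        rw [this, hDv]
        omega
      · by_cases hyneg : y = -h
        · subst hyneg
          rw [Function.update_self, Function.update_of_ne hneh, hDnv]
          have : pvDrops (t.erase (-h)) (-h) = min (t.count (-h) - 1) (t.count h) := by
            simp [pvDrops, hh0, neg_neg, List.count_erase_self,
              List.count_erase_of_ne (fun h => hneh h.symm)]
          rw [this]
          omega
        · rw [Function.update_of_ne hyneg, Function.update_of_ne hyh]
          have hnyh : -y ≠ h := fun he => hyneg (by omega)
          have hnyneg : -y ≠ -h := fun he => hyh (by omega)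
          by_cases hy0 : y = 0
          · subst hy0
            simp [pvDrops, List.count_cons_of_ne h0,
              List.count_erase_of_ne (show (0:Int) ≠ -h by simpa using hnyneg)]
          · simp [pvDrops, hy0,
              List.count_cons_of_ne (fun h => hyh h.symm),
              List.count_cons_of_ne (fun h => hnyh h.symm),
              List.count_erase_of_ne hyneg,
              List.count_erase_of_ne hnyneg]
  | case3 h t hmem ih =>
    -- no later opposite : the head is kept
    rw [pvF, if_neg hmem, ih]
    have hcnt : t.count (-h) = 0 := List.count_eq_zero.2 hmem
    by_cases h0 : h = 0
    · subst h0
      simp only [neg_zero] at hmem hcnt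
      rw [pvG, if_pos (by simp [pvDrops, List.count_cons_self, hcnt])]
      refine congrArg _ ((pvG_congr _ _ _ ?_))
      intro y hy
      have hy0 : y ≠ 0 := fun he => hmem (he ▸ hy)
      have hny0 : (-y) ≠ (0:Int) := by simpa using hy0
      simp [pvDrops, hy0, List.count_cons_of_ne (fun h => hy0 h.symm),
        List.count_cons_of_ne (fun h => hny0 h.symm)]
    · have hneh : -h ≠ h := by intro he; apply h0; omega
      rw [pvG, if_pos (by
        simp [pvDrops, h0, List.count_cons_self, List.count_cons_of_ne hneh.symm, hcnt])]
      refine congrArg _ ((pvG_congr _ _ _ ?_))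
      intro y hy
      have hyneg : y ≠ -h := fun he => hmem (he ▸ hy)
      have hnyh : -y ≠ h := fun he => hyneg (by omega)
      by_cases hy0 : y = 0
      · subst hy0
        simp [pvDrops, List.count_cons_of_ne h0]
      · by_cases hyh : y = h
        · subst hyh
          simp [pvDrops, h0, List.count_cons_self, List.count_cons_of_ne hneh.symm, hcnt]
        · simp [pvDrops, hy0,
            List.count_cons_of_ne (fun h => hyh h.symm),
            List.count_cons_of_ne (fun h => hnyh h.symm)]

theorem delLoop_eq (fuel : Nat) (l : List Int) (i : Nat) (hf : 2 * l.length - i < fuel) :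
    delLoop fuel l i = l.take i ++ pvF (l.drop i) := by
  induction fuel generalizing l i with
  | zero => omega
  | succ fuel ih =>
    by_cases h : i < l.length
    · rw [delLoop, dif_pos h]
      cases hj : PySem.List.index? (l.drop (i + 1)) (-(l[i]'h)) with
      | some j =>
        show delLoop fuel ((l.eraseIdx (i + 1 + j)).eraseIdx i) i
            = List.take i l ++ pvF (List.drop i l)
        obtain ⟨pre, suf, hsplit, hlen, hnot⟩ := (PySem.List.index?_eq_some_iff _ _ _).1 hj
        have hdlen : (l.drop (i + 1)).length = l.length - (i + 1) := List.length_drop ..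
        have hjl : i + 1 + j < l.length := by
          have := congrArg List.length hsplit
          simp at this
          omega
        have hP : (l.take (i+1)).length = i + 1 := List.length_take_of_le (by omega)
        have e1 : l = (l.take (i+1) ++ pre) ++ (-(l[i]'h) :: suf) := by
          conv_lhs => rw [← List.take_append_drop (i+1) l, hsplit]
          rw [List.append_assoc]
        have step1 : l.eraseIdx (i + 1 + j) = (l.take (i+1) ++ pre) ++ suf := by
          conv_lhs => rw [e1]
          rw [List.eraseIdx_append_of_length_le (by simp [hP, hlen]),
            (by simp [hP, hlen] : i + 1 + j - (l.take (i+1) ++ pre).length = 0),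
            List.eraseIdx_cons_zero]
        have hPsplit : l.take (i+1) = l.take i ++ [l[i]'h] := by
          rw [List.take_add_one, List.getElem?_eq_getElem h]
          rfl
        have hTi : (l.take i).length = i := List.length_take_of_le (by omega)
        have step2 : (l.eraseIdx (i + 1 + j)).eraseIdx i = l.take i ++ (pre ++ suf) := by
          rw [step1, hPsplit, List.append_assoc, List.append_assoc,
            List.eraseIdx_append_of_length_le (by omega), (by omega : i - (l.take i).length = 0)]
          simp
        have hfl : 2 * ((l.eraseIdx (i + 1 + j)).eraseIdx i).length - i < fuel := by
          have e2 : (l.eraseIdx (i + 1 + j)).length = l.length - 1 :=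
            List.length_eraseIdx_of_lt hjl
          rw [List.length_eraseIdx_of_lt (by omega), e2]
          omega
        rw [ih _ _ hfl, step2]
        have h1 : List.take i (List.take i l ++ (pre ++ suf)) = List.take i l := by
          rw [List.take_append_of_le_length (by omega), List.take_take, Nat.min_self]
        have h2 : List.drop i (List.take i l ++ (pre ++ suf)) = pre ++ suf := by
          rw [List.drop_append_of_le_length (by omega),
            List.drop_eq_nil_of_le (le_of_eq hTi), List.nil_append]
        rw [h1, h2]
        have hdrop : l.drop i = (l[i]'h) :: (pre ++ -(l[i]'h) :: suf) := by
          rw [List.drop_eq_getElem_cons h, hsplit]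
        rw [hdrop, pvF, if_pos (by simp)]
        rw [List.erase_append_right _ hnot, List.erase_cons_head]
      | none =>
        show delLoop fuel l (i + 1) = List.take i l ++ pvF (List.drop i l)
        have hmem : -(l[i]'h) ∉ l.drop (i + 1) := (PySem.List.index?_eq_none_iff _ _).1 hj
        have hPsplit : l.take (i+1) = l.take i ++ [l[i]'h] := by
          rw [List.take_add_one, List.getElem?_eq_getElem h]
          rfl
        rw [ih _ _ (by omega), hPsplit, List.drop_eq_getElem_cons h, pvF, if_neg hmem,
          List.append_assoc, List.singleton_append]
    · rw [delLoop, dif_neg h,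
        List.drop_eq_nil_of_le (by omega), List.take_of_length_le (by omega)]
      simp [pvF]

theorem pvFold2_getD (t : List Int) (F : Int → Int) (d0 : PySem.Dict Int Int) (y : Int) :
    (t.foldl (fun d x => d.insert x (F x)) d0).getD y 0
      = if y ∈ t then F y else d0.getD y 0 := by
  induction t generalizing d0 with
  | nil => simp
  | cons z t ih =>
    simp only [List.foldl_cons, ih, List.mem_cons]
    by_cases hyt : y ∈ t
    · simp [hyt]
    · by_cases hyz : y = z <;> simp [hyt, hyz, PySem.Dict.getD_insert]

theorem pvFold3 (t : List Int) (out : List Int) (d : PySem.Dict Int Int) :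
    (t.foldl (fun (p : List Int × PySem.Dict Int Int) x =>
        if p.2.getD x 0 > 0 then (p.1, p.2.insert x (p.2.getD x 0 - 1))
        else (p.1 ++ [x], p.2)) (out, d)).1
      = out ++ pvG (fun x => (d.getD x 0).toNat) t := by
  induction t generalizing out d with
  | nil => simp [pvG]
  | cons x t ih =>
    simp only [List.foldl_cons]
    by_cases hx : d.getD x 0 > 0
    · rw [if_pos hx, ih]
      have h1 : pvG (fun y => (d.getD y 0).toNat) (x :: t)
          = pvG (Function.update (fun y => (d.getD y 0).toNat) x ((d.getD x 0).toNat - 1)) t := by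
        simp only [pvG]
        rw [if_neg (by omega)]
      rw [h1]
      refine congrArg _ (pvG_congr _ _ _ ?_)
      intro w _
      by_cases hwx : w = x
      · subst hwx
        rw [Function.update_self, PySem.Dict.getD_insert, if_pos rfl]
        omega
      · rw [Function.update_of_ne hwx, PySem.Dict.getD_insert, if_neg hwx]
    · rw [if_neg hx, ih]
      have h1 : pvG (fun y => (d.getD y 0).toNat) (x :: t)
          = x :: pvG (fun y => (d.getD y 0).toNat) t := by
        simp only [pvG]
        rw [if_pos (by omega)]
      rw [h1]
      simp

theorem altB_eq (l : List Int) : del_elements_alt l = pvG (pvDrops l) l := by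
  simp only [del_elements_alt]
  rw [pvFold3, List.nil_append]
  apply pvG_congr
  intro w hw
  rw [pvFold2_getD, if_pos hw, PySem.Dict.foldl_insert_getD_add_one_eq_counter,
    PySem.Dict.getD_counter, PySem.Dict.getD_counter]
  by_cases hw0 : w = 0
  · subst hw0
    rw [if_pos rfl, pvDrops, if_pos rfl,
      PySem.Int.mod_eq_emod_of_pos (by norm_num)]
    omega
  · rw [if_neg hw0, pvDrops, if_neg hw0]
    omega

-- ===== VERDICT (by name: the statement is the Claim_ definition above) =====
theorem del_elements_spec : Claim_equal_del_elements := by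
  intro l _
  show del_elements l = del_elements_alt l
  rw [del_elements, delLoop_eq _ _ _ (by omega), altB_eq, ← pvF_eq_pvG]
  simp
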